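-- pv_equiv track=rewrite | github.com/hwmaltby/project-euler | problems/problem_130.py | f
-- ===== SOURCE A (Python) =====
-- def f(n):
--     #returns the smallest value of k such that 11..1 = 0 mod n, where 11..1 has k 1's
--     total = 0
--     start = True
--     summand = 1
--     i = 0
--     while total != 0 or start:
--         start = False
--         total = (total + summand) % n
--         summand = (summand * 10) % n
--         i += 1
--     return i
-- ===== SOURCE B (Python) =====
-- def f(n):
--     # smallest k with repunit(k) % n == 0, via: n | repunit(k)  <=>  10**k == 1 (mod 9*|n|)
--     m = 9 * abs(n)
--     p = 10 % m
--     k = 1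
--     while p != 1:
--         p = p * 10 % m
--         k += 1
--     return k
-- ===== Notes on version B (the rewrite author's own statement) =====
-- stated objective: alternative
-- what changed: B replaces A's accumulation of the repunit value mod n (running sum plus a separate power-of-ten summand) by the number-theoretic reformulation n | repunit(k) iff 10^k = 1 (mod 9*|n|), iterating a single power of ten modulo 9*|n| until it returns to 1.
-- outside the precondition, e.g. on f(0): A raises ZeroDivisionError, B raises ZeroDivisionError
import Mathlib
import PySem

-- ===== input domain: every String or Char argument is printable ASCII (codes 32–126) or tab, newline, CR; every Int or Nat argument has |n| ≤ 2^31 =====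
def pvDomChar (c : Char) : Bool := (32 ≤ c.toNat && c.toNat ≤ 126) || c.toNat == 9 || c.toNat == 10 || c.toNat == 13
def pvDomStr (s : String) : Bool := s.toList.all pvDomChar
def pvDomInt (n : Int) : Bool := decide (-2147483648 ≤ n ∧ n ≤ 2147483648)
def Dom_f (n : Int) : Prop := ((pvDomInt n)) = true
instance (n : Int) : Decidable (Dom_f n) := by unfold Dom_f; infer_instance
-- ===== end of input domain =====

-- B replaces A's repunit accumulation mod n by the equivalent test 10^k ≡ 1 (mod 9|n|),
-- tracking a single power of ten (alternative algorithm, same asymptotic cost).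


-- ===== PORT A =====
-- fuel only totalizes the while-loop; on Pre_f inputs the loop ends well within it
def fLoopA (n : Int) (fuel : Nat) (total : Int) (start : Bool) (summand : Int) (i : Int) : Int :=
  if total ≠ 0 ∨ start = true then
    match fuel with
    | 0 => i
    | Nat.succ fuel' =>
        fLoopA n fuel' (PySem.Int.mod (total + summand) n) false
          (PySem.Int.mod (summand * 10) n) (i + 1)
  else i

def f (n : Int) : Int := fLoopA n (9 * n.natAbs + 10) 0 true 1 0

-- ===== PORT B =====
def fLoopB (m : Int) (fuel : Nat) (p : Int) (k : Int) : Int :=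
  if p ≠ 1 then
    match fuel with
    | 0 => k
    | Nat.succ fuel' => fLoopB m fuel' (PySem.Int.mod (p * 10) m) (k + 1)
  else k

def f_alt (n : Int) : Int :=
  fLoopB (9 * |n|) (9 * n.natAbs + 9) (PySem.Int.mod 10 (9 * |n|)) 1

-- ===== PRECONDITION & SPEC =====
-- Pre_f excludes n = 0 (Python: ZeroDivisionError) and n sharing a factor with 10,
-- on which no repunit is divisible by n and A's while-loop never terminates.
def Pre_f (n : Int) : Prop := n ≠ 0 ∧ n.gcd 10 = 1
instance (n : Int) : Decidable (Pre_f n) := by unfold Pre_f; infer_instance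
def pvWitness_f : Int := 7

def Spec_f (n : Int) (out : Int) : Prop := out = f_alt n
instance (n : Int) (out : Int) : Decidable (Spec_f n out) := by unfold Spec_f; infer_instance

-- ===== CLAIM (what is proved, stated in full; the proofs are below) =====
def Claim_equal_f : Prop := ∀ (n : Int), Dom_f n → Pre_f n → Spec_f n (f n)

-- ===== LEMMAS AND PROOFS =====

-- a % b ≡ a (mod b), as divisibility
lemma dvd_sub_mod (a b : Int) : b ∣ a - PySem.Int.mod a b := by
  have h := PySem.Int.floordiv_mul_add_mod a b
  exact ⟨PySem.Int.floordiv a b, by linarith⟩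

lemma dvd_mod_sub (a b : Int) : b ∣ PySem.Int.mod a b - a := by
  rw [← neg_sub a (PySem.Int.mod a b)]
  exact dvd_neg.mpr (dvd_sub_mod a b)

-- congruent arguments have equal Python mod
lemma mod_congr (a a' b : Int) (hb : b ≠ 0) (h : b ∣ a - a') :
    PySem.Int.mod a b = PySem.Int.mod a' b := by
  have hd : b ∣ PySem.Int.mod a b - PySem.Int.mod a' b := by
    have h1 := dvd_sub_mod a b
    have h2 := dvd_sub_mod a' b
    have : PySem.Int.mod a b - PySem.Int.mod a' b
        = (a - a') - (a - PySem.Int.mod a b) + (a' - PySem.Int.mod a' b) := by ring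
    rw [this]
    exact dvd_add (dvd_sub h h1) h2
  rcases lt_trichotomy b 0 with hneg | hz | hpos
  · have b1 := PySem.Int.mod_neg_bounds (a := a) hneg
    have b2 := PySem.Int.mod_neg_bounds (a := a') hneg
    have hd' : -b ∣ PySem.Int.mod a b - PySem.Int.mod a' b := (Int.neg_dvd).mpr hd
    have := Int.eq_zero_of_abs_lt_dvd hd' (abs_lt.mpr ⟨by omega, by omega⟩)
    omega
  · exact absurd hz hb
  · have b1a := PySem.Int.mod_nonneg (a := a) hpos
    have b1b := PySem.Int.mod_lt (a := a) hpos
    have b2a := PySem.Int.mod_nonneg (a := a') hpos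
    have b2b := PySem.Int.mod_lt (a := a') hpos
    have := Int.eq_zero_of_abs_lt_dvd hd (abs_lt.mpr ⟨by omega, by omega⟩)
    omega

lemma mod_idem (a b : Int) (hb : b ≠ 0) :
    PySem.Int.mod (PySem.Int.mod a b) b = PySem.Int.mod a b :=
  mod_congr _ _ _ hb (dvd_mod_sub a b)

lemma mod_eq_dvd (a a' b : Int) (h : PySem.Int.mod a b = PySem.Int.mod a' b) :
    b ∣ a - a' := by
  have h1 := dvd_sub_mod a b
  have h2 := dvd_sub_mod a' b
  have : a - a' = (a - PySem.Int.mod a b) - (a' - PySem.Int.mod a' b) := by rw [h]; ring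
  rw [this]
  exact dvd_sub h1 h2

-- n ∣ z → 9|n| ∣ 9z
lemma dvd9 (n z : Int) (h : n ∣ z) : (9 * |n|) ∣ 9 * z := by
  obtain ⟨c, hc⟩ := h
  rcases abs_cases n with ⟨ha, _⟩ | ⟨ha, _⟩
  · exact ⟨c, by rw [ha, hc]; ring⟩
  · exact ⟨-c, by rw [ha, hc]; ring⟩

lemma mod_one_m (n : Int) (hn : n ≠ 0) : PySem.Int.mod 1 (9 * |n|) = 1 := by
  have hm : (0:Int) < 9 * |n| := by positivity
  rw [PySem.Int.mod_eq_emod_of_pos hm]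
  refine Int.emod_eq_of_lt (by norm_num) ?_
  have : (1:Int) ≤ |n| := by rcases abs_cases n with ⟨ha, hb⟩ | ⟨ha, hb⟩ <;> omega
  linarith

-- the lockstep invariant: t is reduced mod n, s ≡ 9t+1 (mod n); B's state is (9t+1) mod 9|n|
lemma lockstep (n : Int) (hn : n ≠ 0) (fuel : Nat) : ∀ (t s k : Int),
    PySem.Int.mod t n = t →
    PySem.Int.mod s n = PySem.Int.mod (9 * t + 1) n →
    fLoopA n fuel t false s k = fLoopB (9 * |n|) fuel (PySem.Int.mod (9 * t + 1) (9 * |n|)) k := by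
  have hm : (0:Int) < 9 * |n| := by positivity
  have hm' : (9 * |n|) ≠ 0 := by positivity
  induction fuel with
  | zero =>
    intro t s k ht hs
    rw [fLoopA, fLoopB]
    split_ifs <;> rfl
  | succ fuel ih =>
    intro t s k ht hs
    by_cases h : t = 0
    · subst h
      simp [fLoopA, fLoopB, mod_one_m n hn]
    · -- p ≠ 1
      have hp : PySem.Int.mod (9 * t + 1) (9 * |n|) ≠ 1 := by
        intro hp1
        have hp1' : PySem.Int.mod (9 * t + 1) (9 * |n|) = PySem.Int.mod 1 (9 * |n|) := by
          rw [mod_one_m n hn]; exact hp1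
        have hdvd : (9 * |n|) ∣ 9 * t := by
          have := mod_eq_dvd _ _ _ hp1'
          have e : (9:Int) * t + 1 - 1 = 9 * t := by ring
          rwa [e] at this
        have hnt : |n| ∣ t := by
          have : (9:Int) * |n| ∣ 9 * t := hdvd
          exact (mul_dvd_mul_iff_left (by norm_num : (9:Int) ≠ 0)).mp this
        have habs : |t| < |n| := by
          rcases lt_trichotomy n 0 with hneg | hz | hpos
          · have b1 := PySem.Int.mod_neg_bounds (a := t) hneg
            rw [ht] at b1
            rw [abs_lt]; rcases abs_cases n with ⟨ha, hb⟩ | ⟨ha, hb⟩ <;> omega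
          · exact absurd hz hn
          · have b1 := PySem.Int.mod_nonneg (a := t) hpos
            have b2 := PySem.Int.mod_lt (a := t) hpos
            rw [ht] at b1 b2
            rw [abs_lt]; rcases abs_cases n with ⟨ha, hb⟩ | ⟨ha, hb⟩ <;> omega
        exact h (Int.eq_zero_of_abs_lt_dvd hnt habs)
      rw [fLoopA, fLoopB]
      simp only [h, hp, ne_eq, not_false_iff, Bool.false_eq_true, or_false, if_true]
      -- recursive step: new A-state t' = (t+s) % n, s' = (s*10) % n
      have hds : n ∣ s - (9 * t + 1) := mod_eq_dvd _ _ _ hs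
      have hdt' : n ∣ PySem.Int.mod (t + s) n - (t + s) := dvd_mod_sub (t + s) n
      have ht' : PySem.Int.mod (PySem.Int.mod (t + s) n) n = PySem.Int.mod (t + s) n :=
        mod_idem _ _ hn
      have hs' : PySem.Int.mod (PySem.Int.mod (s * 10) n) n
          = PySem.Int.mod (9 * PySem.Int.mod (t + s) n + 1) n := by
        rw [mod_idem _ _ hn]
        apply mod_congr _ _ _ hn
        have e : s * 10 - (9 * PySem.Int.mod (t + s) n + 1)
            = (s - (9 * t + 1)) - 9 * (PySem.Int.mod (t + s) n - (t + s)) := by ring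
        rw [e]
        exact dvd_sub hds (Dvd.dvd.mul_left hdt' 9)
      have hstep := ih (PySem.Int.mod (t + s) n) (PySem.Int.mod (s * 10) n) (k + 1) ht' hs'
      rw [hstep]
      -- B's next state equals (9t'+1) mod 9|n|
      congr 1
      apply mod_congr _ _ _ hm'
      have hdp : (9 * |n|) ∣ PySem.Int.mod (9 * t + 1) (9 * |n|) - (9 * t + 1) :=
        dvd_mod_sub (9 * t + 1) (9 * |n|)
      have e : 9 * PySem.Int.mod (t + s) n + 1 - PySem.Int.mod (9 * t + 1) (9 * |n|) * 10
          = 9 * (PySem.Int.mod (t + s) n - (t + s)) + 9 * (s - (9 * t + 1))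
            - 10 * (PySem.Int.mod (9 * t + 1) (9 * |n|) - (9 * t + 1)) := by ring
      rw [e]
      exact dvd_sub (dvd_add (dvd9 n _ hdt') (dvd9 n _ hds)) (Dvd.dvd.mul_left hdp 10)

-- ===== VERDICT (by name: the statement is the Claim_ definition above) =====
theorem f_spec : Claim_equal_f := by
  intro n _ hpre
  obtain ⟨hn, -⟩ := hpre
  show f n = f_alt n
  rw [f, f_alt]
  have h10 : 9 * n.natAbs + 10 = Nat.succ (9 * n.natAbs + 9) := rfl
  rw [h10, fLoopA]
  simp only [ne_eq, or_true, if_true]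
  have e1 : (0:Int) + 1 = 1 := by ring
  have e2 : (1:Int) * 10 = 10 := by ring
  rw [e1, e2]
  have hinv : PySem.Int.mod (PySem.Int.mod 10 n) n
      = PySem.Int.mod (9 * PySem.Int.mod 1 n + 1) n := by
    rw [mod_idem _ _ hn]
    apply mod_congr _ _ _ hn
    have e : (10:Int) - (9 * PySem.Int.mod 1 n + 1) = -(9 * (PySem.Int.mod 1 n - 1)) := by ring
    rw [e]
    exact dvd_neg.mpr (Dvd.dvd.mul_left (dvd_mod_sub 1 n) 9)
  rw [lockstep n hn _ (PySem.Int.mod 1 n) (PySem.Int.mod 10 n) 1 (mod_idem _ _ hn) hinv]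
  congr 1
  apply mod_congr _ _ _ (by positivity)
  have e : 9 * PySem.Int.mod 1 n + 1 - 10 = 9 * (PySem.Int.mod 1 n - 1) := by ring
  rw [e]
  exact dvd9 n (PySem.Int.mod 1 n - 1) (dvd_mod_sub 1 n)
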